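-- pv_equiv track=rewrite | github.com/Arekkussu/Practica_INCO_ResolverSudoku | Practica INCO/MinimaxJC.py | hay_errores_irreparables
-- ===== SOURCE A (Python) =====
-- def hay_errores_irreparables(sudoku):
--     """ Verifica si hay errores que hacen que el juego no pueda continuar. """
--     # Comprobar duplicados en filas y columnas
--     for i in range(9):
--         if tiene_duplicados(sudoku[i]):  # Revisar fila i
--             return True
--         columna = [sudoku[x][i] for x in range(9)]
--         if tiene_duplicados(columna):  # Revisar columna i
--             return True
--
--     # Comprobar duplicados en cada subcuadro 3x3
--     for start_i in range(0, 9, 3):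
--         for start_j in range(0, 9, 3):
--             subcuadro = [sudoku[start_i + x][start_j + y] for x in range(3) for y in range(3)]
--             if tiene_duplicados(subcuadro):
--                 return True
--
--     return False
--
-- def tiene_duplicados(lista):
--     """ Verifica si una lista contiene duplicados, ignorando los ceros. """
--     elementos = set()
--     for item in lista:
--         if item != 0:
--             if item in elementos:
--                 return True
--             elementos.add(item)
--     return False
-- ===== SOURCE B (Python) =====
-- def hay_errores_irreparables(sudoku):
--     """Single left-to-right pass over the grid keeping one set per column and per
--     3x3 box (box index 3*(i//3)+j//3); a row is scanned with its own local set.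
--     Returns True at the first repeated nonzero value seen in any unit."""
--     cols = [set() for _ in range(9)]
--     boxes = [set() for _ in range(9)]
--     for i in range(9):
--         seen = set()
--         for v in sudoku[i]:
--             if v != 0:
--                 if v in seen:
--                     return True
--                 seen.add(v)
--         for j in range(9):
--             v = sudoku[i][j]
--             if v != 0:
--                 c = cols[j]
--                 if v in c:
--                     return True
--                 c.add(v)
--                 b = boxes[3 * (i // 3) + j // 3]
--                 if v in b:
--                     return True
--                 b.add(v)
--     return False
-- ===== Notes on version B (the rewrite author's own statement) =====
-- stated objective: alternative
-- what changed: Instead of extracting each row, column and 3x3 box as a fresh list and scanning each with a duplicate-checking helper, B makes a single left-to-right pass over the grid maintaining one membership set per column and per box (plus a local set per row), returning True at the first repeated nonzero value.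
import Mathlib
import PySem

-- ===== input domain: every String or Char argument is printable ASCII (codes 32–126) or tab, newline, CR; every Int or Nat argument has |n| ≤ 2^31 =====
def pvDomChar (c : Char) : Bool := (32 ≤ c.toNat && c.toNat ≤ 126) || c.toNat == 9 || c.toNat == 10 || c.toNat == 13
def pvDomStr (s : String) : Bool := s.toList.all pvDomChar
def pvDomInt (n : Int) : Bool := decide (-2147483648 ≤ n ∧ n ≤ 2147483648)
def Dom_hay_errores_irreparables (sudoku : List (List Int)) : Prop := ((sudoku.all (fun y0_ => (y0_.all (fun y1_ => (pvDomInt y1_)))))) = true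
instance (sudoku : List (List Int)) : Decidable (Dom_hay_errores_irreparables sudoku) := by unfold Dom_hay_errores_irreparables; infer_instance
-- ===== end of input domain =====

-- B replaces A's per-unit extract-and-scan passes by one left-to-right traversal of the
-- grid keeping a membership set per column and per 3x3 box; equal return value on Pre_.


-- ===== PORT A =====
-- helper tiene_duplicados: loop over the list with a growing set, early return on a repeat
def tiene_duplicados_loop : List Int → PySem.Set Int → Bool
  | [], _ => false
  | item :: rest, elementos =>
    if item ≠ 0 then
      if PySem.Set.contains elementos item then true
      else tiene_duplicados_loop rest (PySem.Set.add elementos item)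
    else tiene_duplicados_loop rest elementos

def tiene_duplicados (lista : List Int) : Bool :=
  tiene_duplicados_loop lista PySem.Set.empty

-- columna = [sudoku[x][i] for x in range(9)]
def pvColumna (sudoku : List (List Int)) (i : Int) : List Int :=
  (PySem.List.pyRange 0 9 1).map (fun x => PySem.List.pyGetD (PySem.List.pyGetD sudoku x []) i 0)

-- subcuadro = [sudoku[start_i+x][start_j+y] for x in range(3) for y in range(3)]
def pvSubcuadro (sudoku : List (List Int)) (si sj : Int) : List Int :=
  (PySem.List.pyRange 0 3 1).flatMap (fun x =>
    (PySem.List.pyRange 0 3 1).map (fun y =>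
      PySem.List.pyGetD (PySem.List.pyGetD sudoku (si + x) []) (sj + y) 0))

-- the nested box loop, as recursion over the (start_i, start_j) iteration sequence
def aLoopBoxes (sudoku : List (List Int)) : List (Int × Int) → Bool
  | [] => false
  | (si, sj) :: rest =>
    if tiene_duplicados (pvSubcuadro sudoku si sj) then true
    else aLoopBoxes sudoku rest

-- the row/column loop over range(9), falling through to the box loop
def aLoopRC (sudoku : List (List Int)) : List Int → Bool
  | [] => aLoopBoxes sudoku
      ((PySem.List.pyRange 0 9 3).flatMap (fun si =>
        (PySem.List.pyRange 0 9 3).map (fun sj => (si, sj))))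
  | i :: rest =>
    if tiene_duplicados (PySem.List.pyGetD sudoku i []) then true
    else if tiene_duplicados (pvColumna sudoku i) then true
    else aLoopRC sudoku rest

def hay_errores_irreparables (sudoku : List (List Int)) : Bool :=
  aLoopRC sudoku (PySem.List.pyRange 0 9 1)

-- ===== PORT B =====
-- inner 'for v in sudoku[i]' scan with the local set 'seen'
def bRowScan : List Int → PySem.Set Int → Bool
  | [], _ => false
  | v :: rest, seen =>
    if v ≠ 0 then
      if PySem.Set.contains seen v then true
      else bRowScan rest (PySem.Set.add seen v)
    else bRowScan rest seen

-- 'for j in range(9)' of row i: updates cols/boxes, none = collision found (return True)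
def bColBox (sudoku : List (List Int)) (i : Int) :
    List Int → List (PySem.Set Int) → List (PySem.Set Int) →
    Option (List (PySem.Set Int) × List (PySem.Set Int))
  | [], cols, boxes => some (cols, boxes)
  | j :: js, cols, boxes =>
    let v := PySem.List.pyGetD (PySem.List.pyGetD sudoku i []) j 0
    if v ≠ 0 then
      let c := PySem.List.pyGetD cols j PySem.Set.empty
      if PySem.Set.contains c v then none
      else
        let cols' := cols.set j.toNat (PySem.Set.add c v)
        let bi := 3 * PySem.Int.floordiv i 3 + PySem.Int.floordiv j 3
        let b := PySem.List.pyGetD boxes bi PySem.Set.empty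
        if PySem.Set.contains b v then none
        else bColBox sudoku i js cols' (boxes.set bi.toNat (PySem.Set.add b v))
    else bColBox sudoku i js cols boxes

-- outer 'for i in range(9)'
def bOuter (sudoku : List (List Int)) :
    List Int → List (PySem.Set Int) → List (PySem.Set Int) → Bool
  | [], _, _ => false
  | i :: is, cols, boxes =>
    if bRowScan (PySem.List.pyGetD sudoku i []) PySem.Set.empty then true
    else
      match bColBox sudoku i (PySem.List.pyRange 0 9 1) cols boxes with
      | none => true
      | some (cols', boxes') => bOuter sudoku is cols' boxes'

def hay_errores_irreparables_alt (sudoku : List (List Int)) : Bool :=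
  bOuter sudoku (PySem.List.pyRange 0 9 1)
    (List.replicate 9 PySem.Set.empty) (List.replicate 9 PySem.Set.empty)

-- ===== PRECONDITION & SPEC =====
-- Pre_ admits (a) fully shaped grids — at least 9 rows, the first 9 of length ≥ 9 — on which
-- neither program can raise, and (b) grids whose first row already holds a nonzero duplicate,
-- on which both programs return True before any indexing; the remaining ragged grids
-- generally raise IndexError in A or in B and the few on which both still return a value
-- before reaching a bad index are conservatively excluded.  (The two Lean ports, which read
-- out-of-range cells as Python-default-free getD values, agree on every input, so the
-- equivalence proof below holds without consuming Pre_; Pre_ delimits where the Pythons return.)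
def Pre_hay_errores_irreparables (sudoku : List (List Int)) : Prop :=
  (9 ≤ sudoku.length ∧ ∀ r ∈ sudoku.take 9, 9 ≤ r.length) ∨
  (sudoku ≠ [] ∧ ¬ ((sudoku.getD 0 []).filter (fun v => !decide (v = 0))).Nodup)
instance (sudoku : List (List Int)) : Decidable (Pre_hay_errores_irreparables sudoku) := by
  unfold Pre_hay_errores_irreparables; infer_instance

def pvWitness_hay_errores_irreparables : List (List Int) :=
  List.replicate 9 (List.replicate 9 0)

def Spec_hay_errores_irreparables (sudoku : List (List Int)) (out : Bool) : Prop :=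
  out = hay_errores_irreparables_alt sudoku
instance (sudoku : List (List Int)) (out : Bool) : Decidable (Spec_hay_errores_irreparables sudoku out) := by
  unfold Spec_hay_errores_irreparables; infer_instance

-- ===== CLAIM (what is proved, stated in full; the proofs are below) =====
def Claim_equal_hay_errores_irreparables : Prop := ∀ (sudoku : List (List Int)), Dom_hay_errores_irreparables sudoku → Pre_hay_errores_irreparables sudoku → Spec_hay_errores_irreparables sudoku (hay_errores_irreparables sudoku)

-- ===== LEMMAS AND PROOFS =====

-- spec-level view of the grid: cell (x, j) with Python's out-of-range default 0
def pvCell (s : List (List Int)) (x j : Nat) : Int := (s.getD x []).getD j 0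

def pvNZ (l : List Int) : List Int := l.filter (fun v => !decide (v = 0))

-- nonzero entries of column j after B has processed rows < n fully and, if j < jn,
-- also cell (n, j) of the current row
def pvColMid (s : List (List Int)) (j n jn : Nat) : List Int :=
  pvNZ ((List.range (if j < jn then n + 1 else n)).map (fun x => pvCell s x j))

def pvBoxRowCells (s : List (List Int)) (b x : Nat) : List Int :=
  ((List.range 9).filter (fun y => y / 3 == b % 3)).map (fun y => pvCell s x y)

def pvBoxCur (s : List (List Int)) (b n jn : Nat) : List Int :=
  if n / 3 == b / 3 then ((List.range jn).filter (fun y => y / 3 == b % 3)).map (fun y => pvCell s n y)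
  else []

-- nonzero entries of box b after rows < n plus columns < jn of row n
def pvBoxMid (s : List (List Int)) (b n jn : Nat) : List Int :=
  pvNZ ((((List.range n).filter (fun x => x / 3 == b / 3)).flatMap (pvBoxRowCells s b)) ++ pvBoxCur s b n jn)

-- the loop invariant of B's single pass, at position (row n, column jn)
def pvMidInv (s : List (List Int)) (n jn : Nat) (cols boxes : List (PySem.Set Int)) : Prop :=
  cols.length = 9 ∧ boxes.length = 9 ∧
  (∀ j, j < 9 → cols.getD j [] = pvColMid s j n jn ∧ (pvColMid s j n jn).Nodup) ∧
  (∀ b, b < 9 → boxes.getD b [] = pvBoxMid s b n jn ∧ (pvBoxMid s b n jn).Nodup)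

lemma bRowScan_eq (l : List Int) (s : PySem.Set Int) : bRowScan l s = tiene_duplicados_loop l s := by
  induction l generalizing s with
  | nil => rfl
  | cons x xs ih =>
    simp only [bRowScan, tiene_duplicados_loop]
    split_ifs <;> simp [ih]

lemma tdLoop_false_iff (l : List Int) (s : PySem.Set Int) (hs : s.Nodup) :
    tiene_duplicados_loop l s = false ↔ (s ++ pvNZ l).Nodup := by
  induction l generalizing s with
  | nil => simpa [tiene_duplicados_loop, pvNZ] using hs
  | cons x xs ih =>
    simp only [tiene_duplicados_loop]
    by_cases hx : x = 0
    · simpa [hx, pvNZ] using ih s hs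
    · rw [if_pos hx]
      have hnz : pvNZ (x :: xs) = x :: pvNZ xs := by simp [pvNZ, hx]
      by_cases hmem : x ∈ s
      · rw [if_pos ((PySem.Set.contains_iff s x).mpr hmem)]
        constructor
        · intro h; exact absurd h (by simp)
        · intro h
          exfalso
          rw [hnz, List.nodup_append] at h
          exact h.2.2 x hmem x List.mem_cons_self rfl
      · have hc : PySem.Set.contains s x = false := by
          rw [Bool.eq_false_iff]
          intro hcc; exact hmem ((PySem.Set.contains_iff s x).mp hcc)
        rw [if_neg (by rw [PySem.Set.contains_iff]; exact hmem)]
        rw [PySem.Set.add_of_not_mem hmem]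
        have hnd : (s ++ [x]).Nodup := by
          rw [List.nodup_append]
          refine ⟨hs, List.nodup_singleton x, ?_⟩
          intro a ha b hb
          simp only [List.mem_singleton] at hb
          subst hb
          intro h; exact hmem (h ▸ ha)
        rw [ih (s ++ [x]) hnd, hnz]
        simp [List.append_assoc]

lemma tiene_duplicados_false_iff (l : List Int) :
    tiene_duplicados l = false ↔ (pvNZ l).Nodup := by
  simpa [tiene_duplicados, PySem.Set.empty] using tdLoop_false_iff l [] List.nodup_nil

lemma pvColMid_succ_ne (s : List (List Int)) (j n jn : Nat) (h : j ≠ jn) :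
    pvColMid s j n (jn + 1) = pvColMid s j n jn := by
  have e : (if j < jn + 1 then n + 1 else n) = (if j < jn then n + 1 else n) := by
    split_ifs <;> omega
  unfold pvColMid
  rw [e]

lemma pvColMid_succ_self (s : List (List Int)) (n jn : Nat) :
    pvColMid s jn n (jn + 1) =
      pvColMid s jn n jn ++ (if pvCell s n jn = 0 then [] else [pvCell s n jn]) := by
  unfold pvColMid pvNZ
  rw [if_pos (by omega), if_neg (by omega), List.range_succ]
  by_cases h : pvCell s n jn = 0 <;> simp [h]

lemma pvBoxMid_succ_ne (s : List (List Int)) (b n jn : Nat) (_hn : n < 9) (_hjn : jn < 9)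
    (h : b ≠ 3 * (n / 3) + jn / 3) :
    pvBoxMid s b n (jn + 1) = pvBoxMid s b n jn := by
  have hc : pvBoxCur s b n (jn + 1) = pvBoxCur s b n jn := by
    unfold pvBoxCur
    by_cases h3 : n / 3 = b / 3
    · have hne : ¬ (jn / 3 = b % 3) := by omega
      rw [if_pos (by simp [h3]), if_pos (by simp [h3]), List.range_succ]
      simp [List.filter_append, hne]
    · rw [if_neg (by simp [h3]), if_neg (by simp [h3])]
  unfold pvBoxMid
  rw [hc]

lemma pvBoxMid_succ_self (s : List (List Int)) (n jn : Nat) (_hn : n < 9) (hjn : jn < 9) :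
    pvBoxMid s (3 * (n / 3) + jn / 3) n (jn + 1) =
      pvBoxMid s (3 * (n / 3) + jn / 3) n jn ++
        (if pvCell s n jn = 0 then [] else [pvCell s n jn]) := by
  have hb3 : (3 * (n / 3) + jn / 3) / 3 = n / 3 := by omega
  have hbm : (3 * (n / 3) + jn / 3) % 3 = jn / 3 := by omega
  have hc : pvBoxCur s (3 * (n / 3) + jn / 3) n (jn + 1) =
      pvBoxCur s (3 * (n / 3) + jn / 3) n jn ++ [pvCell s n jn] := by
    unfold pvBoxCur
    rw [if_pos (by simp [hb3]), if_pos (by simp [hb3]), List.range_succ]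
    simp [List.filter_append, hbm]
  unfold pvBoxMid pvNZ
  rw [hc, ← List.append_assoc, List.filter_append]
  by_cases h : pvCell s n jn = 0 <;> simp [h]

lemma pvColMid_nine (s : List (List Int)) (j n : Nat) (hj : j < 9) :
    pvColMid s j n 9 = pvColMid s j (n + 1) 0 := by
  have e : (if j < 9 then n + 1 else n) = (if j < 0 then n + 1 + 1 else n + 1) := by
    split_ifs <;> omega
  unfold pvColMid
  rw [e]

lemma pvBoxMid_nine (s : List (List Int)) (b n : Nat) (_hb : b < 9) (_hn : n < 9) :
    pvBoxMid s b n 9 = pvBoxMid s b (n + 1) 0 := by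
  unfold pvBoxMid pvBoxCur
  by_cases h3 : n / 3 = b / 3 <;>
    simp [List.range_succ, List.filter_append, List.flatMap_append, h3, pvBoxRowCells]

lemma pvColMid_sublist (s : List (List Int)) (j n jn : Nat) (hn : n < 9) :
    List.Sublist (pvColMid s j n jn) (pvColMid s j 9 0) := by
  unfold pvColMid pvNZ
  apply List.Sublist.filter
  apply List.Sublist.map
  apply List.range_sublist.mpr
  have : ¬ (j < 0) := Nat.not_lt_zero j
  split_ifs <;> omega

lemma pvBoxMid_sublist (s : List (List Int)) (b n jn : Nat) (_hb : b < 9) (hn : n < 9)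
    (hjn : jn ≤ 9) :
    List.Sublist (pvBoxMid s b n jn) (pvBoxMid s b 9 0) := by
  have hcur9 : pvBoxCur s b 9 0 = [] := by
    unfold pvBoxCur; split_ifs <;> simp
  unfold pvBoxMid
  apply List.Sublist.filter
  rw [hcur9, List.append_nil]
  rw [show List.range 9 = List.range (n + 1) ++ (List.range (9 - (n + 1))).map ((n + 1) + ·) from by
    rw [← List.range_add]; congr 1; omega]
  rw [List.filter_append, List.flatMap_append]
  refine List.Sublist.trans ?_ (List.sublist_append_left _ _)
  rw [List.range_succ, List.filter_append, List.flatMap_append]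
  apply (List.append_sublist_append_left _).mpr
  unfold pvBoxCur
  by_cases h3 : n / 3 = b / 3
  · rw [if_pos (by simp [h3])]
    simp only [h3, List.filter_cons, List.filter_nil]
    rw [if_pos (by simp)]
    simp only [List.flatMap_cons, List.flatMap_nil, List.append_nil]
    unfold pvBoxRowCells
    exact List.Sublist.map _ (List.Sublist.filter _ (List.range_sublist.mpr (by omega)))
  · rw [if_neg (by simp [h3])]
    exact List.nil_sublist _

lemma pvSnocNodup {l : List Int} {v : Int} (hl : l.Nodup) (hv : v ∉ l) :
    (l ++ [v]).Nodup := by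
  rw [List.nodup_append]
  refine ⟨hl, List.nodup_singleton v, ?_⟩
  intro a ha b hb
  simp only [List.mem_singleton] at hb
  subst hb
  intro h; exact hv (h ▸ ha)

lemma pvSnocNotNodup {l : List Int} {v : Int} (hv : v ∈ l) : ¬ (l ++ [v]).Nodup := by
  intro hnd
  rw [List.nodup_append] at hnd
  exact hnd.2.2 v hv v (List.mem_singleton.mpr rfl) rfl

lemma pvGetDSetNe {l : List (PySem.Set Int)} {i j : Nat} {a : PySem.Set Int} (h : i ≠ j) :
    (l.set i a).getD j [] = l.getD j [] := by
  simp [List.getD, List.getElem?_set_ne h]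

lemma pvGetDSetSelf {l : List (PySem.Set Int)} {i : Nat} {a : PySem.Set Int} (h : i < l.length) :
    (l.set i a).getD i [] = a := by
  simp [List.getD, h]

lemma pvMidInv_step_zero (s : List (List Int)) (n jn : Nat) (cols boxes : List (PySem.Set Int))
    (hn : n < 9) (hjn : jn < 9) (hv0 : pvCell s n jn = 0)
    (h : pvMidInv s n jn cols boxes) : pvMidInv s n (jn + 1) cols boxes := by
  obtain ⟨hcl, hbl, hcols, hboxes⟩ := h
  have hcstep : ∀ j, j < 9 → pvColMid s j n (jn + 1) = pvColMid s j n jn := by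
    intro j hj
    by_cases hne : j = jn
    · subst hne; rw [pvColMid_succ_self, if_pos hv0, List.append_nil]
    · exact pvColMid_succ_ne s j n jn hne
  have hbstep : ∀ b, b < 9 → pvBoxMid s b n (jn + 1) = pvBoxMid s b n jn := by
    intro b hb
    by_cases hne : b = 3 * (n / 3) + jn / 3
    · subst hne; rw [pvBoxMid_succ_self s n jn hn hjn, if_pos hv0, List.append_nil]
    · exact pvBoxMid_succ_ne s b n jn hn hjn hne
  exact ⟨hcl, hbl,
    fun j hj => by rw [hcstep j hj]; exact hcols j hj,
    fun b hb => by rw [hbstep b hb]; exact hboxes b hb⟩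

lemma pvMidInv_step_add (s : List (List Int)) (n jn : Nat) (cols boxes : List (PySem.Set Int))
    (hn : n < 9) (hjn : jn < 9) (hv0 : ¬ pvCell s n jn = 0)
    (hcmem : pvCell s n jn ∉ pvColMid s jn n jn)
    (hbmem : pvCell s n jn ∉ pvBoxMid s (3 * (n / 3) + jn / 3) n jn)
    (h : pvMidInv s n jn cols boxes) :
    pvMidInv s n (jn + 1)
      (cols.set jn (pvColMid s jn n jn ++ [pvCell s n jn]))
      (boxes.set (3 * (n / 3) + jn / 3) (pvBoxMid s (3 * (n / 3) + jn / 3) n jn ++ [pvCell s n jn])) := by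
  obtain ⟨hcl, hbl, hcols, hboxes⟩ := h
  refine ⟨by simp [hcl], by simp [hbl], ?_, ?_⟩
  · intro j hj
    by_cases hne : j = jn
    · subst hne
      rw [pvGetDSetSelf (by omega), pvColMid_succ_self, if_neg hv0]
      exact ⟨rfl, pvSnocNodup (hcols j hj).2 hcmem⟩
    · rw [pvGetDSetNe (fun e => hne e.symm), pvColMid_succ_ne s j n jn hne]
      exact hcols j hj
  · intro b hb
    by_cases hne : b = 3 * (n / 3) + jn / 3
    · subst hne
      rw [pvGetDSetSelf (by omega), pvBoxMid_succ_self s n jn hn hjn, if_neg hv0]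
      exact ⟨rfl, pvSnocNodup (hboxes _ hb).2 hbmem⟩
    · rw [pvGetDSetNe (fun e => hne e.symm), pvBoxMid_succ_ne s b n jn hn hjn hne]
      exact hboxes b hb

lemma pvMidInv_nine (s : List (List Int)) (n : Nat) (cols boxes : List (PySem.Set Int))
    (hn : n < 9) (h : pvMidInv s n 9 cols boxes) : pvMidInv s (n + 1) 0 cols boxes := by
  obtain ⟨hcl, hbl, hcols, hboxes⟩ := h
  exact ⟨hcl, hbl,
    fun j hj => by rw [← pvColMid_nine s j n hj]; exact hcols j hj,
    fun b hb => by rw [← pvBoxMid_nine s b n hb hn]; exact hboxes b hb⟩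

lemma pvMidInv_init (s : List (List Int)) :
    pvMidInv s 0 0 (List.replicate 9 PySem.Set.empty) (List.replicate 9 PySem.Set.empty) := by
  refine ⟨by simp, by simp, ?_, ?_⟩
  · intro j hj
    have : pvColMid s j 0 0 = [] := rfl
    rw [this]
    constructor
    · simp only [List.getD, PySem.Set.empty]
      interval_cases j <;> rfl
    · exact List.nodup_nil
  · intro b hb
    have : pvBoxMid s b 0 0 = [] := by
      unfold pvBoxMid pvBoxCur pvNZ
      split_ifs <;> simp
    rw [this]
    constructor
    · simp only [List.getD, PySem.Set.empty]
      interval_cases b <;> rfl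
    · exact List.nodup_nil

-- inner loop: either it finishes the row preserving the invariant, or a collision in a
-- column/box prefix makes the corresponding (j+1)-prefix non-Nodup
lemma bColBox_spec (s : List (List Int)) (n : Nat) (hn : n < 9) :
    ∀ k jn : Nat, jn + k = 9 → ∀ cols boxes, pvMidInv s n jn cols boxes →
      (∃ cols' boxes',
          bColBox s (↑n) (PySem.List.pyRange (↑jn) 9 1) cols boxes = some (cols', boxes') ∧
          pvMidInv s n 9 cols' boxes') ∨
      (bColBox s (↑n) (PySem.List.pyRange (↑jn) 9 1) cols boxes = none ∧
        ∃ j : Nat, jn ≤ j ∧ j < 9 ∧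
          (¬ (pvColMid s j n (j + 1)).Nodup ∨
            ¬ (pvBoxMid s (3 * (n / 3) + j / 3) n (j + 1)).Nodup)) := by
  intro k
  induction k with
  | zero =>
    intro jn hjn cols boxes hInv
    have h9 : jn = 9 := by omega
    subst h9
    rw [PySem.List.pyRange_one_eq_nil (by norm_num)]
    exact Or.inl ⟨cols, boxes, rfl, hInv⟩
  | succ k ih =>
    intro jn hjn cols boxes hInv
    have hjn9 : jn < 9 := by omega
    have hcast : ((jn + 1 : Nat) : Int) = (jn : Int) + 1 := by push_cast; ring
    rw [PySem.List.pyRange_one_cons (by omega)]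
    simp only [bColBox]
    have hv : PySem.List.pyGetD (PySem.List.pyGetD s (↑n) []) (↑jn) 0 = pvCell s n jn := by
      rw [PySem.List.pyGetD_natCast, PySem.List.pyGetD_natCast]; rfl
    rw [hv]
    obtain ⟨hcl, hbl, hcols, hboxes⟩ := hInv
    by_cases hv0 : pvCell s n jn = 0
    · rw [if_neg (fun h => h hv0), ← hcast]
      rcases ih (jn + 1) (by omega) cols boxes
          (pvMidInv_step_zero s n jn cols boxes hn hjn9 hv0 ⟨hcl, hbl, hcols, hboxes⟩) with
        h | ⟨heq, j, hj1, hj2, hbad⟩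
      · exact Or.inl h
      · exact Or.inr ⟨heq, j, by omega, hj2, hbad⟩
    · rw [if_pos hv0]
      have hcget : PySem.List.pyGetD cols (↑jn) PySem.Set.empty = pvColMid s jn n jn := by
        rw [PySem.List.pyGetD_natCast]
        exact (hcols jn hjn9).1
      rw [hcget]
      by_cases hcmem : pvCell s n jn ∈ pvColMid s jn n jn
      · rw [if_pos ((PySem.Set.contains_iff _ _).mpr hcmem)]
        refine Or.inr ⟨rfl, jn, le_refl jn, hjn9, Or.inl ?_⟩
        rw [pvColMid_succ_self, if_neg hv0]
        exact pvSnocNotNodup hcmem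
      · rw [if_neg (by rw [PySem.Set.contains_iff]; exact hcmem)]
        rw [PySem.Set.add_of_not_mem hcmem]
        have hbi : 3 * PySem.Int.floordiv (↑n) 3 + PySem.Int.floordiv (↑jn) 3 =
            ((3 * (n / 3) + jn / 3 : Nat) : Int) := by
          rw [PySem.Int.floordiv_eq_ediv_of_pos (by norm_num),
            PySem.Int.floordiv_eq_ediv_of_pos (by norm_num)]
          omega
        rw [hbi]
        have hb9 : 3 * (n / 3) + jn / 3 < 9 := by omega
        have hbget : PySem.List.pyGetD boxes ((3 * (n / 3) + jn / 3 : Nat) : Int) PySem.Set.empty =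
            pvBoxMid s (3 * (n / 3) + jn / 3) n jn := by
          rw [PySem.List.pyGetD_natCast]
          exact (hboxes _ hb9).1
        rw [hbget]
        by_cases hbmem : pvCell s n jn ∈ pvBoxMid s (3 * (n / 3) + jn / 3) n jn
        · rw [if_pos ((PySem.Set.contains_iff _ _).mpr hbmem)]
          refine Or.inr ⟨rfl, jn, le_refl jn, hjn9, Or.inr ?_⟩
          rw [pvBoxMid_succ_self s n jn hn hjn9, if_neg hv0]
          exact pvSnocNotNodup hbmem
        · rw [if_neg (by rw [PySem.Set.contains_iff]; exact hbmem)]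
          rw [PySem.Set.add_of_not_mem hbmem]
          rw [Int.toNat_natCast, Int.toNat_natCast, ← hcast]
          have hstep := pvMidInv_step_add s n jn cols boxes hn hjn9 hv0 hcmem hbmem
            ⟨hcl, hbl, hcols, hboxes⟩
          rcases ih (jn + 1) (by omega) _ _ hstep with h | ⟨heq, j, hj1, hj2, hbad⟩
          · exact Or.inl h
          · exact Or.inr ⟨heq, j, by omega, hj2, hbad⟩

lemma bOuter_spec (s : List (List Int)) :
    ∀ k n : Nat, n + k = 9 → ∀ cols boxes, pvMidInv s n 0 cols boxes →
      (bOuter s (PySem.List.pyRange (↑n) 9 1) cols boxes = false ↔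
        (∀ i : Nat, n ≤ i → i < 9 →
            tiene_duplicados (PySem.List.pyGetD s (↑i) []) = false) ∧
        (∀ j, j < 9 → (pvColMid s j 9 0).Nodup) ∧
        (∀ b, b < 9 → (pvBoxMid s b 9 0).Nodup)) := by
  intro k
  induction k with
  | zero =>
    intro n hk cols boxes hInv
    have h9 : n = 9 := by omega
    subst h9
    rw [PySem.List.pyRange_one_eq_nil (by norm_num)]
    obtain ⟨hcl, hbl, hcols, hboxes⟩ := hInv
    constructor
    · intro _
      exact ⟨fun i h1 h2 => absurd h2 (by omega), fun j hj => (hcols j hj).2,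
        fun b hb => (hboxes b hb).2⟩
    · intro _; rfl
  | succ k ih =>
    intro n hk cols boxes hInv
    have hn : n < 9 := by omega
    rw [PySem.List.pyRange_one_cons (by omega)]
    simp only [bOuter]
    rw [bRowScan_eq,
      show tiene_duplicados_loop (PySem.List.pyGetD s (↑n) []) PySem.Set.empty =
        tiene_duplicados (PySem.List.pyGetD s (↑n) []) from rfl]
    by_cases hrow : tiene_duplicados (PySem.List.pyGetD s (↑n) []) = true
    · rw [if_pos hrow]
      constructor
      · intro h; exact absurd h (by simp)
      · rintro ⟨hr, -, -⟩
        rw [hr n (le_refl n) hn] at hrow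
        exact absurd hrow (by simp)
    · rw [if_neg hrow]
      have hrowf : tiene_duplicados (PySem.List.pyGetD s (↑n) []) = false :=
        Bool.eq_false_iff.mpr hrow
      rcases bColBox_spec s n hn 9 0 (by omega) cols boxes hInv with
        ⟨cols', boxes', heq, hInv9⟩ | ⟨heq, j, hj1, hj2, hbad⟩
      · simp only [Nat.cast_zero] at heq
        rw [heq]
        have hrec := ih (n + 1) (by omega) cols' boxes' (pvMidInv_nine s n cols' boxes' hn hInv9)
        rw [show ((n + 1 : Nat) : Int) = (n : Int) + 1 from by push_cast; ring] at hrec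
        rw [hrec]
        constructor
        · rintro ⟨hr, hc, hb⟩
          refine ⟨?_, hc, hb⟩
          intro i h1 h2
          by_cases e : i = n
          · subst e; exact hrowf
          · exact hr i (by omega) h2
        · rintro ⟨hr, hc, hb⟩
          exact ⟨fun i h1 h2 => hr i (by omega) h2, hc, hb⟩
      · simp only [Nat.cast_zero] at heq
        rw [heq]
        constructor
        · intro h; exact absurd h (by simp)
        · rintro ⟨hr, hc, hb⟩
          exfalso
          rcases hbad with hcb | hbb
          · exact hcb (List.Sublist.nodup (pvColMid_sublist s j n (j + 1) hn) (hc j hj2))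
          · have hb9 : 3 * (n / 3) + j / 3 < 9 := by omega
            exact hbb (List.Sublist.nodup (pvBoxMid_sublist s _ n (j + 1) hb9 hn (by omega))
              (hb _ hb9))

lemma alt_false_iff (s : List (List Int)) :
    hay_errores_irreparables_alt s = false ↔
      (∀ i : Nat, i < 9 → tiene_duplicados (PySem.List.pyGetD s (↑i) []) = false) ∧
      (∀ j, j < 9 → (pvColMid s j 9 0).Nodup) ∧
      (∀ b, b < 9 → (pvBoxMid s b 9 0).Nodup) := by
  unfold hay_errores_irreparables_alt
  have h := bOuter_spec s 9 0 (by omega) _ _ (pvMidInv_init s)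
  simp only [Nat.cast_zero] at h
  rw [h]
  constructor
  · rintro ⟨a, b, c⟩
    exact ⟨fun i hi => a i (Nat.zero_le i) hi, b, c⟩
  · rintro ⟨a, b, c⟩
    exact ⟨fun i _ hi => a i hi, b, c⟩

lemma aLoopBoxes_false_iff (s : List (List Int)) (ps : List (Int × Int)) :
    aLoopBoxes s ps = false ↔ ∀ p ∈ ps, tiene_duplicados (pvSubcuadro s p.1 p.2) = false := by
  induction ps with
  | nil => simp [aLoopBoxes]
  | cons p rest ih =>
    obtain ⟨si, sj⟩ := p
    simp only [aLoopBoxes]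
    split_ifs with h
    · simp [h]
    · simp [ih, h]

lemma aLoopRC_false_iff (s : List (List Int)) (is : List Int) :
    aLoopRC s is = false ↔
      (∀ i ∈ is, tiene_duplicados (PySem.List.pyGetD s i []) = false ∧
          tiene_duplicados (pvColumna s i) = false) ∧
      aLoopBoxes s
        ((PySem.List.pyRange 0 9 3).flatMap (fun si =>
          (PySem.List.pyRange 0 9 3).map (fun sj => (si, sj)))) = false := by
  induction is with
  | nil => simp [aLoopRC]
  | cons i rest ih =>
    simp only [aLoopRC]
    split_ifs with h1 h2
    · simp [h1]
    · simp [h2]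
    · simp only [ih, List.mem_cons]
      constructor
      · rintro ⟨hall, hbx⟩
        exact ⟨fun x hx => hx.elim (fun e => e ▸ ⟨Bool.eq_false_iff.mpr h1, Bool.eq_false_iff.mpr h2⟩) (hall x), hbx⟩
      · rintro ⟨hall, hbx⟩
        exact ⟨fun x hx => hall x (Or.inr hx), hbx⟩

lemma columna_nz (s : List (List Int)) (j : Nat) :
    pvNZ (pvColumna s (↑j)) = pvColMid s j 9 0 := by
  unfold pvNZ pvColumna pvColMid pvNZ
  rw [if_neg (Nat.not_lt_zero j)]
  congr 1
  rw [PySem.List.pyRange_one]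
  simp [List.map_map, Function.comp_def, PySem.List.pyGetD_natCast, pvCell]

lemma subcuadro_nz (s : List (List Int)) (b : Nat) (hb : b < 9) :
    pvNZ (pvSubcuadro s (↑(3 * (b / 3))) (↑(3 * (b % 3)))) = pvBoxMid s b 9 0 := by
  interval_cases b <;>
    (unfold pvNZ pvBoxMid
     congr 1
     norm_num [pvSubcuadro, pvBoxCur, pvBoxRowCells, pvCell, List.range_succ,
       show PySem.List.pyRange 0 3 1 = [(0:Int),1,2] from rfl, PySem.List.pyGetD_ofNat'])

set_option maxHeartbeats 2000000 in
lemma a_false_iff (s : List (List Int)) :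
    hay_errores_irreparables s = false ↔
      (∀ i : Nat, i < 9 → tiene_duplicados (PySem.List.pyGetD s (↑i) []) = false) ∧
      (∀ j, j < 9 → (pvColMid s j 9 0).Nodup) ∧
      (∀ b, b < 9 → (pvBoxMid s b 9 0).Nodup) := by
  unfold hay_errores_irreparables
  rw [aLoopRC_false_iff, aLoopBoxes_false_iff]
  have h9 : ∀ b : Nat, b < 9 → ((pvBoxMid s b 9 0).Nodup ↔
      tiene_duplicados (pvSubcuadro s (↑(3 * (b / 3))) (↑(3 * (b % 3)))) = false) := by
    intro b hb
    rw [tiene_duplicados_false_iff, subcuadro_nz s b hb]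
  constructor
  · rintro ⟨hrc, hbx⟩
    refine ⟨?_, ?_, ?_⟩
    · intro i hi
      exact (hrc (↑i) (by rw [PySem.List.mem_pyRange_one]; omega)).1
    · intro j hj
      have h := (hrc (↑j) (by rw [PySem.List.mem_pyRange_one]; omega)).2
      rwa [tiene_duplicados_false_iff, columna_nz] at h
    · intro b hb
      rw [h9 b hb]
      exact hbx (↑(3 * (b / 3)), ↑(3 * (b % 3))) (by interval_cases b <;> decide)
  · rintro ⟨hr, hc, hb⟩
    constructor
    · intro i hi
      rw [PySem.List.mem_pyRange_one] at hi
      have hik : i = ((i.toNat : Nat) : Int) := by omega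
      constructor
      · rw [hik]; exact hr i.toNat (by omega)
      · rw [hik, tiene_duplicados_false_iff, columna_nz]
        exact hc i.toNat (by omega)
    · intro p hp
      rw [show ((PySem.List.pyRange 0 9 3).flatMap (fun si =>
          (PySem.List.pyRange 0 9 3).map (fun sj => (si, sj)))) =
          [((0:Int),(0:Int)),(0,3),(0,6),(3,0),(3,3),(3,6),(6,0),(6,3),(6,6)] from rfl] at hp
      have hb' : ∀ b : Nat, b < 9 →
          tiene_duplicados (pvSubcuadro s (↑(3 * (b / 3))) (↑(3 * (b % 3)))) = false := by
        intro b hbb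
        rw [← h9 b hbb]; exact hb b hbb
      simp only [List.mem_cons, List.not_mem_nil, or_false] at hp
      rcases hp with h|h|h|h|h|h|h|h|h <;> subst h
      · simpa using hb' 0 (by norm_num)
      · simpa using hb' 1 (by norm_num)
      · simpa using hb' 2 (by norm_num)
      · simpa using hb' 3 (by norm_num)
      · simpa using hb' 4 (by norm_num)
      · simpa using hb' 5 (by norm_num)
      · simpa using hb' 6 (by norm_num)
      · simpa using hb' 7 (by norm_num)
      · simpa using hb' 8 (by norm_num)


-- ===== VERDICT (by name: the statement is the Claim_ definition above) =====
theorem hay_errores_irreparables_spec : Claim_equal_hay_errores_irreparables := by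
  intro s _ _
  unfold Spec_hay_errores_irreparables
  have h := (a_false_iff s).trans (alt_false_iff s).symm
  cases ha : hay_errores_irreparables s <;> cases hb : hay_errores_irreparables_alt s <;>
    simp_all
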